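-- pv_equiv track=rewrite | github.com/ZoltePudeleczko/AdventofCode | src/Day18.py | put_brackets_addition
-- ===== SOURCE A (Python) =====
-- def put_brackets_addition(expression):
--     i = 0
--     while '+' in expression[i:]:
--         index = expression[i:].index('+') + i
--         bracketsCount = 0
--         for x in range(index - 1, -1, -1):
--             if expression[x].isdigit() and bracketsCount == 0:
--                 expression.insert(x, '(')
--                 break
--             elif expression[x] == ')':
--                 bracketsCount += 1
--             elif expression[x] == '(':
--                 bracketsCount -= 1
--                 if bracketsCount == 0:
--                     expression.insert(x, '(')
--                     break
--         bracketsCount = 0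
--         for x in range(index + 1, len(expression)):
--             if expression[x].isdigit() and bracketsCount == 0:
--                 expression.insert(x + 1, ')')
--                 break
--             elif expression[x] == '(':
--                 bracketsCount += 1
--             elif expression[x] == ')':
--                 bracketsCount -= 1
--                 if bracketsCount == 0:
--                     expression.insert(x, ')')
--                     break
--         i = index + 2
--     return expression
-- ===== SOURCE B (Python) =====
-- def _find_plus(e, i):
--     # first position >= i holding '+', or None
--     for k in range(i, len(e)):
--         if e[k] == '+':
--             return k
--     return None
--
--
-- def _bal(t):
--     # balance contribution used by the left-operand scan: ')' opens, '(' closes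
--     return (t == ')') - (t == '(')
--
--
-- def _open_pos(e, idx):
--     # Position where '(' must go so that it encloses the left operand of the
--     # '+' at idx: the LAST x < idx that starts a digit token or a balanced
--     # '(...)' group ending just before idx.  A single forward pass with a
--     # running prefix balance; x qualifies iff prefix balance at x equals the
--     # whole-prefix balance and e[x] is a digit token or '('.
--     total = sum(_bal(t) for t in e[:idx])
--     pos = None
--     run = 0
--     for x in range(idx):
--         t = e[x]
--         if run == total and (t.isdigit() or t == '('):
--             pos = x
--         run += _bal(t)
--     return pos
--
--
-- def _close_pos(e, start):
--     # Insertion position for ')' after the right operand: first digit token at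
--     # depth 0 (insert after it) or the ')' closing the first group (insert before it).
--     cnt = 0
--     for x in range(start, len(e)):
--         t = e[x]
--         if t.isdigit() and cnt == 0:
--             return x + 1
--         if t == ')' and cnt == 1:
--             return x
--         cnt += (t == '(') - (t == ')')
--     return None
--
--
-- def put_brackets_addition(expression):
--     # NOTE: unlike the original, this rebuilds the list purely (the argument is
--     # not mutated); the equivalence is about the return value.
--     e = list(expression)
--     i = 0
--     while True:
--         idx = _find_plus(e, i)
--         if idx is None:
--             return e
--         p = idx
--         lp = _open_pos(e, idx)
--         if lp is not None:
--             e = e[:lp] + ['('] + e[lp:]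
--             p += 1
--         rp = _close_pos(e, p + 1)
--         if rp is not None:
--             e = e[:rp] + [')'] + e[rp:]
--         i = idx + 2
-- ===== Notes on version B (the rewrite author's own statement) =====
-- stated objective: alternative
-- what changed: A repeatedly slices the list ('+' in expression[i:], .index) and mutates it in place with inserts found by a backward parenthesis-counting scan; B is pure (rebuilds via slicing), finds each '+' with a single index scan, and locates the '(' insertion point by a forward prefix-balance pass with one unified predicate (last position whose prefix balance equals the whole-prefix balance and whose token is a digit or '('), proven equal to A's backward scan.
import Mathlib
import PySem

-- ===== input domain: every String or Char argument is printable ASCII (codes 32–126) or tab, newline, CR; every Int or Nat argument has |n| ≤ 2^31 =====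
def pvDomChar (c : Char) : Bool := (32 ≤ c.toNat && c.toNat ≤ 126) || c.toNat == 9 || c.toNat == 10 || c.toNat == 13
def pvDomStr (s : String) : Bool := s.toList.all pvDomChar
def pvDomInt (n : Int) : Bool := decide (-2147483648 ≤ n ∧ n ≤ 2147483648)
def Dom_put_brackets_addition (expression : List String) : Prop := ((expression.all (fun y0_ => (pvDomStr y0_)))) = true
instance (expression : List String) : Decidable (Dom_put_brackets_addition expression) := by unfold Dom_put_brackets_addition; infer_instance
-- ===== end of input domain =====

-- B rewraps each '+' operand by a restructured pure algorithm (forward prefix-balance scan with one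
-- unified predicate instead of A's backward counting scan with in-place inserts); same asymptotic cost.
-- A mutates its argument in place and returns it; B rebuilds the list purely — the equivalence proved
-- here is about the RETURN value.

-- expression[x] (loop indices are in range; out-of-range default "" is never hit on executed paths)
def pvTok (e : List String) (x : Nat) : String := e.getD x ""

-- ===== PORT A =====
-- inner loop 'for x in range(index - 1, -1, -1)': the Nat argument is position+1, counting down
def pvALeft (e : List String) (cnt : Int) : Nat → List String
  | 0 => e
  | x + 1 =>
    if PySem.Str.strIsdigit (pvTok e x) = true ∧ cnt = 0 then e.insertIdx x "("
    else if pvTok e x = ")" then pvALeft e (cnt + 1) x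
    else if pvTok e x = "(" then
      if cnt - 1 = 0 then e.insertIdx x "(" else pvALeft e (cnt - 1) x
    else pvALeft e cnt x

-- inner loop 'for x in range(index + 1, len(expression))'
def pvARight (e : List String) (cnt : Int) (x : Nat) : List String :=
  if _h : x < e.length then
    if PySem.Str.strIsdigit (pvTok e x) = true ∧ cnt = 0 then e.insertIdx (x + 1) ")"
    else if pvTok e x = "(" then pvARight e (cnt + 1) (x + 1)
    else if pvTok e x = ")" then
      if cnt - 1 = 0 then e.insertIdx x ")" else pvARight e (cnt - 1) (x + 1)
    else pvARight e cnt (x + 1)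
  else e
termination_by e.length - x

-- the while loop; every iteration strictly decreases the number of '+' in the suffix expression[i:],
-- so fuel = length + 1 never runs out (the fuel is a totality guard only)
def pvAMain : Nat → List String → Nat → List String
  | 0, e, _ => e
  | fuel + 1, e, i =>
    if (e.drop i).contains "+" then
      match PySem.List.index? (e.drop i) "+" with
      | some j =>
        pvAMain fuel (pvARight (pvALeft e 0 (j + i)) 0 ((j + i) + 1)) ((j + i) + 2)
      | none => e
    else e

def put_brackets_addition (expression : List String) : List String :=
  pvAMain (expression.length + 1) expression 0

-- ===== PORT B =====
def pvBal (t : String) : Int := (if t = ")" then 1 else 0) - (if t = "(" then 1 else 0)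

-- _find_plus
def pvBFind (e : List String) (i : Nat) : Option Nat :=
  if _h : i < e.length then
    if pvTok e i = "+" then some i else pvBFind e (i + 1)
  else none
termination_by e.length - i

-- _open_pos: forward pass, last x < idx whose prefix balance equals the total and whose token
-- is a digit token or '('
def pvBOpen (e : List String) (idx : Nat) : Option Nat :=
  ((List.range idx).foldl
    (fun (s : Int × Option Nat) x =>
      (s.1 + pvBal (pvTok e x),
       if s.1 = (e.take idx).foldl (fun a t => a + pvBal t) 0 ∧
           (PySem.Str.strIsdigit (pvTok e x) = true ∨ pvTok e x = "(") then some x else s.2))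
    ((0 : Int), (none : Option Nat))).2

-- _close_pos
def pvBClose (e : List String) (cnt : Int) (x : Nat) : Option Nat :=
  if _h : x < e.length then
    if PySem.Str.strIsdigit (pvTok e x) = true ∧ cnt = 0 then some (x + 1)
    else if pvTok e x = ")" ∧ cnt = 1 then some x
    else pvBClose e (cnt + ((if pvTok e x = "(" then 1 else 0) - (if pvTok e x = ")" then 1 else 0))) (x + 1)
  else none
termination_by e.length - x

-- the outer while loop of B (the same totality fuel guard as in A's port)
def pvBMain : Nat → List String → Nat → List String
  | 0, e, _ => e
  | fuel + 1, e, i =>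
    match pvBFind e i with
    | none => e
    | some idx =>
      match pvBOpen e idx with
      | some lp =>
        pvBMain fuel
          (match pvBClose (e.take lp ++ "(" :: e.drop lp) 0 (idx + 2) with
           | some rp => (e.take lp ++ "(" :: e.drop lp).take rp ++ ")" :: (e.take lp ++ "(" :: e.drop lp).drop rp
           | none => e.take lp ++ "(" :: e.drop lp)
          (idx + 2)
      | none =>
        pvBMain fuel
          (match pvBClose e 0 (idx + 1) with
           | some rp => e.take rp ++ ")" :: e.drop rp
           | none => e)
          (idx + 2)

def put_brackets_addition_alt (expression : List String) : List String :=
  pvBMain (expression.length + 1) expression 0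

-- ===== PRECONDITION & SPEC =====
def Spec_put_brackets_addition (expression : List String) (out : List String) : Prop := out = put_brackets_addition_alt expression
instance (expression : List String) (out : List String) : Decidable (Spec_put_brackets_addition expression out) := by unfold Spec_put_brackets_addition; infer_instance

-- ===== CLAIM (what is proved, stated in full; the proofs are below) =====
def Claim_equal_put_brackets_addition : Prop := ∀ (expression : List String), Dom_put_brackets_addition expression → Spec_put_brackets_addition expression (put_brackets_addition expression)

-- ===== LEMMAS AND PROOFS =====

-- running prefix balance and the unified insertion predicate of B's left scan
def pvPre (e : List String) (n : Nat) : Int := (e.take n).foldl (fun a t => a + pvBal t) 0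

def pvLastQ (e : List String) (T : Int) : Nat → Option Nat
  | 0 => none
  | x + 1 =>
    if pvPre e x = T ∧ (PySem.Str.strIsdigit (pvTok e x) = true ∨ pvTok e x = "(") then some x
    else pvLastQ e T x

lemma pvInsertIdx_eq (l : List String) (n : Nat) (a : String) (h : n ≤ l.length) :
    l.insertIdx n a = l.take n ++ a :: l.drop n := by
  induction l generalizing n with
  | nil => simp_all
  | cons x xs ih =>
    cases n with
    | zero => simp [List.insertIdx]
    | succ m => simp [List.insertIdx_succ_cons, ih m (by simpa using h)]

lemma pvBal_of_digit {t : String} (h : PySem.Str.strIsdigit t = true) :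
    t ≠ ")" ∧ t ≠ "(" := by
  constructor <;> rintro rfl <;> exact absurd h (by decide)

lemma pvPre_succ (e : List String) (n : Nat) :
    pvPre e (n + 1) = pvPre e n + pvBal (pvTok e n) := by
  by_cases h : n < e.length
  · rw [pvPre, pvPre, List.take_add_one, List.foldl_append, pvTok,
        List.getD_eq_getElem?_getD, List.getElem?_eq_getElem h]
    simp
  · rw [pvPre, pvPre, List.take_of_length_le (by omega), List.take_of_length_le (by omega),
        pvTok, List.getD_eq_getElem?_getD, List.getElem?_eq_none (by omega)]
    simp [pvBal]

lemma pvLastQ_lt {e : List String} {T : Int} {n j : Nat} (h : pvLastQ e T n = some j) :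
    j < n := by
  induction n with
  | zero => simp [pvLastQ] at h
  | succ m ih =>
    rw [pvLastQ] at h
    split at h
    · injection h with h; omega
    · exact Nat.lt_succ_of_lt (ih h)

lemma pvBOpen_eq (e : List String) (idx : Nat) :
    pvBOpen e idx = pvLastQ e (pvPre e idx) idx := by
  have key : ∀ n,
      ((List.range n).foldl
        (fun (s : Int × Option Nat) x =>
          (s.1 + pvBal (pvTok e x),
           if s.1 = (e.take idx).foldl (fun a t => a + pvBal t) 0 ∧
               (PySem.Str.strIsdigit (pvTok e x) = true ∨ pvTok e x = "(") then some x else s.2))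
        ((0 : Int), (none : Option Nat)))
      = (pvPre e n, pvLastQ e (pvPre e idx) n) := by
    intro n
    induction n with
    | zero => simp [pvPre, pvLastQ]
    | succ m ih =>
      rw [List.range_succ, List.foldl_append, ih]
      simp only [List.foldl_cons, List.foldl_nil]
      rw [pvLastQ, ← pvPre_succ]
      rfl
  rw [pvBOpen, key idx]

lemma pvALeft_eq (e : List String) (T : Int) :
    ∀ x, pvALeft e (T - pvPre e x) x =
      (match pvLastQ e T x with
       | some j => e.insertIdx j "("
       | none => e) := by
  intro x
  induction x with
  | zero => simp [pvALeft, pvLastQ]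
  | succ m ih =>
    have hps := pvPre_succ e m
    rw [pvALeft, pvLastQ]
    by_cases hd : PySem.Str.strIsdigit (pvTok e m) = true
    · obtain ⟨hne1, hne2⟩ := pvBal_of_digit hd
      have hb : pvBal (pvTok e m) = 0 := by simp [pvBal, hne1, hne2]
      by_cases hq : pvPre e m = T
      · have hc : T - pvPre e (m + 1) = 0 := by omega
        rw [if_pos ⟨hd, hc⟩, if_pos (show pvPre e m = T ∧ _ from ⟨hq, Or.inl hd⟩)]
      · have hc : ¬(T - pvPre e (m + 1) = 0) := by omega
        have hrw : T - pvPre e (m + 1) = T - pvPre e m := by omega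
        rw [if_neg (fun h => hc h.2), if_neg hne1, if_neg hne2, hrw,
          if_neg (fun h : pvPre e m = T ∧ _ => hq h.1)]
        exact ih
    · by_cases h1 : pvTok e m = ")"
      · have hb : pvBal (pvTok e m) = 1 := by simp [pvBal, h1]
        have hrw : T - pvPre e (m + 1) + 1 = T - pvPre e m := by omega
        have hnq : ¬(pvPre e m = T ∧
            (PySem.Str.strIsdigit (pvTok e m) = true ∨ pvTok e m = "(")) := by
          rintro ⟨-, h' | h'⟩
          · exact hd h'
          · exact absurd (h1.symm.trans h') (by decide)
        rw [if_neg (fun h => hd h.1), if_pos h1, hrw, if_neg hnq]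
        exact ih
      · by_cases h2 : pvTok e m = "("
        · have hb : pvBal (pvTok e m) = -1 := by simp [pvBal, h2]
          by_cases hq : pvPre e m = T
          · have hc : T - pvPre e (m + 1) - 1 = 0 := by omega
            rw [if_neg (fun h => hd h.1), if_neg h1, if_pos h2, if_pos hc,
              if_pos (show pvPre e m = T ∧ _ from ⟨hq, Or.inr h2⟩)]
          · have hc : ¬(T - pvPre e (m + 1) - 1 = 0) := by omega
            have hrw : T - pvPre e (m + 1) - 1 = T - pvPre e m := by omega
            rw [if_neg (fun h => hd h.1), if_neg h1, if_pos h2, if_neg hc, hrw,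
              if_neg (fun h : pvPre e m = T ∧ _ => hq h.1)]
            exact ih
        · have hb : pvBal (pvTok e m) = 0 := by simp [pvBal, h1, h2]
          have hrw : T - pvPre e (m + 1) = T - pvPre e m := by omega
          have hnq : ¬(pvPre e m = T ∧
            (PySem.Str.strIsdigit (pvTok e m) = true ∨ pvTok e m = "(")) := by
            rintro ⟨-, h' | h'⟩
            · exact hd h'
            · exact h2 h'
          rw [if_neg (fun h => hd h.1), if_neg h1, if_neg h2, hrw, if_neg hnq]
          exact ih

lemma pvARight_eq (e : List String) (cnt : Int) (x : Nat) :
    pvARight e cnt x =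
      (match pvBClose e cnt x with
       | some r => e.insertIdx r ")"
       | none => e) := by
  fun_induction pvARight e cnt x with
  | case1 cnt x hlt hdig =>
    rw [pvBClose, dif_pos hlt, if_pos hdig]
  | case2 cnt x hlt hdig hpar ih =>
    have hb : cnt + ((if pvTok e x = "(" then (1:Int) else 0) - (if pvTok e x = ")" then 1 else 0))
        = cnt + 1 := by
      rw [if_pos hpar, if_neg (fun h' => absurd (h'.symm.trans hpar) (by decide))]; ring
    rw [pvBClose, dif_pos hlt, if_neg hdig,
      if_neg (fun h => absurd (h.1.symm.trans hpar) (by decide)), hb]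
    exact ih
  | case3 cnt x hlt hdig hnpar hpar hc =>
    have hc1 : cnt = 1 := by omega
    rw [pvBClose, dif_pos hlt, if_neg hdig, if_pos ⟨hpar, hc1⟩]
  | case4 cnt x hlt hdig hnpar hpar hc ih =>
    have hc1 : ¬(pvTok e x = ")" ∧ cnt = 1) := by rintro ⟨-, rfl⟩; omega
    have hb : cnt + ((if pvTok e x = "(" then (1:Int) else 0) - (if pvTok e x = ")" then 1 else 0))
        = cnt - 1 := by
      rw [if_neg hnpar, if_pos hpar]; ring
    rw [pvBClose, dif_pos hlt, if_neg hdig, if_neg hc1, hb]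
    exact ih
  | case5 cnt x hlt hdig hnpar hnpar2 ih =>
    have hb : cnt + ((if pvTok e x = "(" then (1:Int) else 0) - (if pvTok e x = ")" then 1 else 0))
        = cnt := by
      rw [if_neg hnpar, if_neg hnpar2]; ring
    rw [pvBClose, dif_pos hlt, if_neg hdig, if_neg (fun h => hnpar2 h.1), hb]
    exact ih
  | case6 cnt x hlt =>
    rw [pvBClose, dif_neg hlt]

lemma pvARight_plus_step (e : List String) (cnt : Int) (x : Nat)
    (hx : x < e.length) (ht : pvTok e x = "+") :
    pvARight e cnt x = pvARight e cnt (x + 1) := by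
  rw [pvARight, dif_pos hx,
    if_neg (by rintro ⟨h', -⟩; rw [ht] at h'; exact absurd h' (by decide)),
    if_neg (by rw [ht]; decide), if_neg (by rw [ht]; decide)]

lemma pvBFind_eq (e : List String) : ∀ i,
    pvBFind e i = (PySem.List.index? (e.drop i) "+").map (· + i) := by
  intro i
  fun_induction pvBFind e i with
  | case1 i hi ht =>
    have hgl : pvTok e i = e[i] := by
      rw [pvTok, List.getD_eq_getElem?_getD, List.getElem?_eq_getElem hi]; rfl
    rw [List.drop_eq_getElem_cons hi, ← hgl, ht, PySem.List.index?_cons_self]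
    simp
  | case2 i hi ht ih =>
    have hgl : pvTok e i = e[i] := by
      rw [pvTok, List.getD_eq_getElem?_getD, List.getElem?_eq_getElem hi]; rfl
    rw [List.drop_eq_getElem_cons hi,
      PySem.List.index?_cons_of_ne _ (by rw [← hgl]; exact ht), ih,
      Option.map_map]
    congr 1
    funext k
    simp [Function.comp]
    omega
  | case3 i hi =>
    rw [List.drop_eq_nil_of_le (by omega)]
    have : ("+" : String) ∉ ([] : List String) := by simp
    rw [(PySem.List.index?_eq_none_iff _ _).mpr this]
    rfl

lemma pvBFind_some {e : List String} {i idx : Nat} (h : pvBFind e i = some idx) :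
    idx < e.length ∧ pvTok e idx = "+" := by
  fun_induction pvBFind e i with
  | case1 i hi ht => cases h; exact ⟨hi, ht⟩
  | case2 i hi ht ih => exact ih h
  | case3 i hi => cases h

lemma pvBClose_le {e : List String} {cnt : Int} {x r : Nat}
    (h : pvBClose e cnt x = some r) : r ≤ e.length := by
  fun_induction pvBClose e cnt x with
  | case1 cnt x hlt hdig => cases h; omega
  | case2 cnt x hlt hdig hpar => cases h; omega
  | case3 cnt x hlt hdig hpar ih => exact ih h
  | case4 cnt x hlt => cases h

lemma pvMain_eq : ∀ fuel e i, pvAMain fuel e i = pvBMain fuel e i := by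
  intro fuel
  induction fuel with
  | zero => intro e i; rfl
  | succ f ih =>
    intro e i
    rw [pvAMain, pvBMain]
    cases hf : pvBFind e i with
    | none =>
      have hfe := pvBFind_eq e i
      rw [hf] at hfe
      have hidx : PySem.List.index? (e.drop i) "+" = none := by
        cases h : PySem.List.index? (e.drop i) "+" with
        | none => rfl
        | some j => rw [h] at hfe; simp at hfe
      have hmem : ("+" : String) ∉ e.drop i := (PySem.List.index?_eq_none_iff _ _).mp hidx
      rw [if_neg (by simp [List.contains_eq_mem, hmem])]
    | some idx =>
      have hfe := pvBFind_eq e i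
      rw [hf] at hfe
      obtain ⟨j, hj, hji⟩ : ∃ j, PySem.List.index? (e.drop i) "+" = some j ∧ j + i = idx := by
        cases h : PySem.List.index? (e.drop i) "+" with
        | none => rw [h] at hfe; simp at hfe
        | some j =>
          rw [h] at hfe
          simp only [Option.map_some, Option.some.injEq] at hfe
          exact ⟨j, rfl, hfe.symm⟩
      have hsome : (PySem.List.index? (e.drop i) "+").isSome := by rw [hj]; rfl
      have hmem : ("+" : String) ∈ e.drop i := (PySem.List.index?_isSome_iff _ _).mp hsome
      obtain ⟨hlen, htok⟩ := pvBFind_some hf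
      rw [if_pos (by simp [List.contains_eq_mem, hmem]), hj]
      simp only [hji]
      -- left insert: A's backward scan equals B's forward-scan position
      have hA1 := pvALeft_eq e (pvPre e idx) idx
      rw [sub_self] at hA1
      rw [← pvBOpen_eq] at hA1
      cases ho : pvBOpen e idx with
      | none =>
        rw [ho] at hA1
        simp only at hA1
        simp only []
        rw [hA1, pvARight_eq]
        cases hr : pvBClose e 0 (idx + 1) with
        | none => simp only []; exact ih _ _
        | some rp =>
          simp only []
          rw [pvInsertIdx_eq _ _ _ (pvBClose_le hr)]
          exact ih _ _
      | some lp =>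
        rw [ho] at hA1
        simp only at hA1
        simp only []
        have hlp : lp < idx := by
          apply pvLastQ_lt (T := pvPre e idx)
          rw [← pvBOpen_eq]
          exact ho
        rw [hA1, pvInsertIdx_eq e lp "(" (by omega)]
        have hlen1 : (e.take lp ++ "(" :: e.drop lp).length = e.length + 1 := by
          simp
        have htok1 : pvTok (e.take lp ++ "(" :: e.drop lp) (idx + 1) = "+" := by
          rw [pvTok, List.getD_eq_getElem?_getD,
            List.getElem?_append_right (by simp [List.length_take]; omega)]
          have h1 : (List.take lp e).length = lp := by simp; omega
          rw [h1, show idx + 1 - lp = (idx - lp) + 1 by omega]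
          simp only [List.getElem?_cons_succ]
          rw [List.getElem?_drop, show lp + (idx - lp) = idx by omega,
            ← List.getD_eq_getElem?_getD]
          exact htok
        rw [pvARight_plus_step _ 0 (idx + 1) (by omega) htok1, pvARight_eq]
        cases hr : pvBClose (e.take lp ++ "(" :: e.drop lp) 0 (idx + 2) with
        | none => simp only []; exact ih _ _
        | some rp =>
          simp only []
          rw [pvInsertIdx_eq _ _ _ (pvBClose_le hr)]
          exact ih _ _

-- ===== VERDICT (by name: the statement is the Claim_ definition above) =====
theorem put_brackets_addition_spec : Claim_equal_put_brackets_addition := by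
  intro e _
  unfold Spec_put_brackets_addition put_brackets_addition put_brackets_addition_alt
  exact pvMain_eq _ e 0
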